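-- pv_equiv track=rewrite | github.com/ivi982010/SySdL-TPs | Lexer.py | a_OpRel7
-- ===== SOURCE A (Python) =====
-- def a_OpRel7(tokens, acu):
-- 	s=0;
-- 	for c in acu:
-- 		if s==0 and c=='=':
-- 			s=1
-- 		elif s==1 and c=='=':
-- 			s=2
-- 		else:
-- 			s=-1
-- 			break
-- 	if s==2:
-- 		tokens.append(("<OpRel>",acu))
-- 	return s==2
-- ===== SOURCE B (Python) =====
-- def a_OpRel7(tokens, acu):
--     match = (acu == "==")
--     if match:
--         tokens.append(("<OpRel>", acu))
--     return match
-- ===== Notes on version B (the rewrite author's own statement) =====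
-- stated objective: simpler
-- what changed: Replaces A's hand-rolled character-by-character state machine (state variable with break) by a single closed-form string comparison acu == "=="; same tokens mutation and same bool for every input.
import Mathlib
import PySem

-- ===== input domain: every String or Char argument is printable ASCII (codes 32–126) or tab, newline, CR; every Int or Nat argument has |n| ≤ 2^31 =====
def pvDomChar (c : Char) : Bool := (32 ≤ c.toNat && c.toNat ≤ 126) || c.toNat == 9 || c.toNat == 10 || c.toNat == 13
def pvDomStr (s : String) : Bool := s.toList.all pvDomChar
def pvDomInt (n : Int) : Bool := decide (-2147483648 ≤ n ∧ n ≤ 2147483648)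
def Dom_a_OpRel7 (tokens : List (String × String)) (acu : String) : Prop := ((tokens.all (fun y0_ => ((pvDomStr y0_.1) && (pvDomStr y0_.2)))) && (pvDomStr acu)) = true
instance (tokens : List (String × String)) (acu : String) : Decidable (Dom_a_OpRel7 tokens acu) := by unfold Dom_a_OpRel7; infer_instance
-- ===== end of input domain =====

-- B replaces A's hand-rolled per-character DFA by one closed-form comparison acu == "==";
-- both Pythons append ("<OpRel>", acu) to tokens exactly when returning True (equal side effects);
-- the equivalence proved here is about the RETURN value only.

-- ===== PORT A =====
-- A's loop over acu's characters carrying the state s; the 'break' makes the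
-- else-branch terminate the loop immediately with s = -1.
def a_OpRel7_loop : List Char → Int → Int
  | [], s => s
  | c :: cs, s =>
    if s == 0 && c == '=' then a_OpRel7_loop cs 1
    else if s == 1 && c == '=' then a_OpRel7_loop cs 2
    else -1

def a_OpRel7 (tokens : List (String × String)) (acu : String) : Bool :=
  a_OpRel7_loop acu.toList 0 == 2

-- ===== PORT B =====
def a_OpRel7_alt (tokens : List (String × String)) (acu : String) : Bool :=
  acu == "=="

-- ===== PRECONDITION & SPEC =====
def Spec_a_OpRel7 (tokens : List (String × String)) (acu : String) (out : Bool) : Prop := out = a_OpRel7_alt tokens acu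
instance (tokens : List (String × String)) (acu : String) (out : Bool) : Decidable (Spec_a_OpRel7 tokens acu out) := by unfold Spec_a_OpRel7; infer_instance

-- ===== CLAIM (what is proved, stated in full; the proofs are below) =====
def Claim_equal_a_OpRel7 : Prop := ∀ (tokens : List (String × String)) (acu : String), Dom_a_OpRel7 tokens acu → Spec_a_OpRel7 tokens acu (a_OpRel7 tokens acu)

-- ===== LEMMAS AND PROOFS =====

theorem a_OpRel7_loop_from_two (l : List Char) : a_OpRel7_loop l 2 = 2 ↔ l = [] := by
  cases l with
  | nil => simp [a_OpRel7_loop]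
  | cons c cs => simp [a_OpRel7_loop]

theorem a_OpRel7_loop_char (l : List Char) : a_OpRel7_loop l 0 = 2 ↔ l = ['=', '='] := by
  match l with
  | [] => simp [a_OpRel7_loop]
  | [c] =>
    simp only [a_OpRel7_loop]
    split_ifs <;> simp_all
  | c :: d :: rest =>
    simp only [a_OpRel7_loop]
    split_ifs with h1 h2 h3 h4 <;>
      simp_all [a_OpRel7_loop_from_two]

theorem a_OpRel7_str_eq : ("==" : String).toList = ['=', '='] := by simp

-- ===== VERDICT (by name: the statement is the Claim_ definition above) =====
theorem a_OpRel7_spec : Claim_equal_a_OpRel7 := by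
  intro tokens acu _
  unfold Spec_a_OpRel7 a_OpRel7 a_OpRel7_alt
  rw [Bool.eq_iff_iff]
  simp only [beq_iff_eq]
  rw [a_OpRel7_loop_char, ← String.toList_inj, a_OpRel7_str_eq]
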